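-- pv_equiv track=rewrite | github.com/ind1xa/opm | funkcije.py | moguPovecatNa
-- ===== SOURCE A (Python) =====
-- def moguPovecatNa(prethodnaFja, index, n, kreniOd0 = False):
--     fjaZaBrojanje = []
--     prethodna = prethodnaFja.copy()
--     if (kreniOd0): prethodna[index] = 0;
--     for x in range (0, index):
--         fjaZaBrojanje.append(prethodna[x])
--     i = 1
--     while (prethodna[index] + i <= n):
--         if (fjaZaBrojanje.count(prethodna[index] + i) == 0):
--             return prethodna[index] + i
--         i = i +1
--     return -1
-- ===== SOURCE B (Python) =====
-- def moguPovecatNa(prethodnaFja, index, n, kreniOd0=False):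
--     base = 0 if kreniOd0 else prethodnaFja[index]
--     candidate = base + 1
--     # forbidden values: the prefix strictly before position index (empty when index <= 0)
--     for f in sorted(set(prethodnaFja[:max(index, 0)])):
--         if f < candidate:
--             continue
--         if f == candidate:
--             candidate += 1
--         else:
--             break
--     return candidate if candidate <= n else -1
-- ===== Notes on version B (the rewrite author's own statement) =====
-- stated objective: alternative
-- what changed: Instead of re-counting the growing prefix list for every candidate in a while-loop (and mutating a copy when kreniOd0), B computes the base directly, sorts the distinct forbidden prefix values once and finds the first gap above base in a single ascending scan without any mutation.
import Mathlib
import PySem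

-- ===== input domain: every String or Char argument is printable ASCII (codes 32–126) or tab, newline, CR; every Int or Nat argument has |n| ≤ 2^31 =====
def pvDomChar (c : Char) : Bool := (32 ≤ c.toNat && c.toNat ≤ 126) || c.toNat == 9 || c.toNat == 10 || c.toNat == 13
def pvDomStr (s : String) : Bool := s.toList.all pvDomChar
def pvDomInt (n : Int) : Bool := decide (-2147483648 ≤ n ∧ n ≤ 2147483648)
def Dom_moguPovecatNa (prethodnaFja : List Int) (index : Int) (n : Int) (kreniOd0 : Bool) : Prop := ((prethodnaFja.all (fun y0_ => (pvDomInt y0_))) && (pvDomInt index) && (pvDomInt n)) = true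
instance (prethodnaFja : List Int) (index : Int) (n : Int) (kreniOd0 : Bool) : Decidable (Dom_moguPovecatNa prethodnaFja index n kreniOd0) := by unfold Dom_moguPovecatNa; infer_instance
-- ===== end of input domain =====

-- B replaces A's per-candidate counting loop over a mutated copy by one ascending scan of the
-- sorted distinct prefix values (alternative decomposition; return value only, A does not mutate its argument).

-- ===== PORT A =====
-- the while-loop of A: i counts up while prethodna[index] + i <= n; fuel (n - base).toNat + 1 is
-- always enough for the loop to reach its exit condition, so the 0-case is never the returned path
def pvWhileA (fja : List Int) (base n : Int) : Nat → Int → Int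
  | 0, _ => -1
  | fuel+1, i =>
    if base + i ≤ n then
      if fja.count (base + i) = 0 then base + i
      else pvWhileA fja base n fuel (i+1)
    else -1

def moguPovecatNa (prethodnaFja : List Int) (index : Int) (n : Int) (kreniOd0 : Bool) : Int :=
  let prethodna := if kreniOd0 then PySem.List.pySetD prethodnaFja index 0 else prethodnaFja
  let fjaZaBrojanje := (PySem.List.pyRange 0 index 1).map (fun x => PySem.List.pyGetD prethodna x 0)
  pvWhileA fjaZaBrojanje (PySem.List.pyGetD prethodna index 0) n
    ((n - PySem.List.pyGetD prethodna index 0).toNat + 1) 1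

-- ===== PORT B =====
-- the for-loop of B: scan the sorted forbidden values, bumping the candidate past equal values
def pvScanB (forb : List Int) (c : Int) : Int :=
  match forb with
  | [] => c
  | f :: rest => if f < c then pvScanB rest c else if f = c then pvScanB rest (c+1) else c

def moguPovecatNa_alt (prethodnaFja : List Int) (index : Int) (n : Int) (kreniOd0 : Bool) : Int :=
  let base := if kreniOd0 then 0 else PySem.List.pyGetD prethodnaFja index 0
  let forb := PySem.List.sorted
    (PySem.Set.ofList (PySem.List.slice prethodnaFja none (some (max index 0)))) (fun x => x) false
  let c := pvScanB forb (base + 1)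
  if c ≤ n then c else -1

-- ===== PRECONDITION & SPEC =====
-- Pre_ excludes exactly the inputs where A raises IndexError: index outside [-len, len) for the
-- accesses prethodna[index] (and the assignment prethodna[index] = 0 when kreniOd0).
def Pre_moguPovecatNa (prethodnaFja : List Int) (index : Int) (n : Int) (kreniOd0 : Bool) : Prop :=
  PySem.Raise.InRange prethodnaFja.length index
instance (prethodnaFja : List Int) (index : Int) (n : Int) (kreniOd0 : Bool) : Decidable (Pre_moguPovecatNa prethodnaFja index n kreniOd0) := by unfold Pre_moguPovecatNa; infer_instance

def pvWitness_moguPovecatNa : List Int × Int × Int × Bool := ([1, 2, 1], 2, 4, false)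

def Spec_moguPovecatNa (prethodnaFja : List Int) (index : Int) (n : Int) (kreniOd0 : Bool) (out : Int) : Prop := out = moguPovecatNa_alt prethodnaFja index n kreniOd0
instance (prethodnaFja : List Int) (index : Int) (n : Int) (kreniOd0 : Bool) (out : Int) : Decidable (Spec_moguPovecatNa prethodnaFja index n kreniOd0 out) := by unfold Spec_moguPovecatNa; infer_instance

-- ===== CLAIM (what is proved, stated in full; the proofs are below) =====
def Claim_equal_moguPovecatNa : Prop := ∀ (prethodnaFja : List Int) (index : Int) (n : Int) (kreniOd0 : Bool), Dom_moguPovecatNa prethodnaFja index n kreniOd0 → Pre_moguPovecatNa prethodnaFja index n kreniOd0 → Spec_moguPovecatNa prethodnaFja index n kreniOd0 (moguPovecatNa prethodnaFja index n kreniOd0)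

-- ===== LEMMAS AND PROOFS =====

-- the Nat position a Python index i (possibly negative, in range) denotes in a list of length nn
def pvIdx (nn : Nat) (i : Int) : Nat := if 0 ≤ i then i.toNat else nn - (-i).toNat

theorem pvIdx_lt (nn : Nat) (i : Int) (h : PySem.Raise.InRange nn i) : pvIdx nn i < nn := by
  obtain ⟨h1, h2⟩ := h
  unfold pvIdx
  split <;> omega

theorem pvGetD_idx (l : List Int) (i : Int) (d : Int) (h : PySem.Raise.InRange l.length i) :
    PySem.List.pyGetD l i d = l.getD (pvIdx l.length i) d := by
  obtain ⟨h1, h2⟩ := h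
  by_cases h0 : 0 ≤ i
  · rw [PySem.List.pyGetD_eq_getElem l d h0 h2, pvIdx, if_pos h0, List.getD,
      List.getElem?_eq_getElem (by omega), Option.getD_some]
  · have hk : i = -(((-i).toNat : Nat) : Int) := by omega
    rw [hk, PySem.List.pyGetD_neg_natCast l (-i).toNat d (by omega) (by omega),
      pvIdx, if_neg (by omega), List.getD, List.getElem?_eq_getElem (by omega), Option.getD_some]
    have hmax : max (-i) 0 = -i := max_eq_left (by omega)
    simp [hmax]

theorem pvSetD_idx (l : List Int) (i : Int) (v : Int) (h : PySem.Raise.InRange l.length i) :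
    PySem.List.pySetD l i v = l.set (pvIdx l.length i) v := by
  obtain ⟨h1, h2⟩ := h
  simp only [PySem.List.pySetD, PySem.List.pySet?, PySem.List.pyIdx?, pvIdx]
  split
  · simp
  · simp

-- what both programs compute: the least value in (base, n] not in F, or -1 if there is none
def pvGood (F : List Int) (base n r : Int) : Prop :=
  (r = -1 ∧ ∀ v, base < v → v ≤ n → v ∈ F) ∨
  (base < r ∧ r ≤ n ∧ r ∉ F ∧ ∀ v, base < v → v < r → v ∈ F)

theorem pvGood_unique (F : List Int) (base n r₁ r₂ : Int)
    (h₁ : pvGood F base n r₁) (h₂ : pvGood F base n r₂) : r₁ = r₂ := by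
  rcases h₁ with ⟨e₁, a₁⟩ | ⟨b₁, l₁, m₁, min₁⟩ <;> rcases h₂ with ⟨e₂, a₂⟩ | ⟨b₂, l₂, m₂, min₂⟩
  · omega
  · exact absurd (a₁ r₂ b₂ l₂) m₂
  · exact absurd (a₂ r₁ b₁ l₁) m₁
  · by_contra hne
    rcases lt_or_gt_of_ne hne with h | h
    · exact m₁ (min₂ r₁ b₁ h)
    · exact m₂ (min₁ r₂ b₂ h)

theorem pvWhileA_good (F : List Int) (base n : Int) :
    ∀ (fuel : Nat) (i : Int), 1 ≤ i → (n + 1 - (base + i)).toNat < fuel →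
      (∀ v, base < v → v < base + i → v ∈ F) →
      pvGood F base n (pvWhileA F base n fuel i) := by
  intro fuel
  induction fuel with
  | zero => intro i _ hf _; omega
  | succ f ih =>
    intro i hi hf hinv
    rw [pvWhileA]
    by_cases hle : base + i ≤ n
    · simp only [if_pos hle]
      by_cases hc : F.count (base + i) = 0
      · simp only [if_pos hc]
        refine Or.inr ⟨by omega, hle, ?_, hinv⟩
        simpa [List.count_eq_zero] using hc
      · simp only [if_neg hc]
        refine ih (i + 1) (by omega) (by omega) ?_
        intro v hv hv'
        by_cases hvi : v = base + i
        · subst hvi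
          have : 0 < F.count (base + i) := Nat.pos_of_ne_zero hc
          exact List.count_pos_iff.mp this
        · exact hinv v hv (by omega)
    · simp only [if_neg hle]
      exact Or.inl ⟨rfl, fun v hv hv' => hinv v hv (by omega)⟩

theorem pvScanB_good (F : List Int) :
    ∀ (L : List Int) (c : Int), L.Pairwise (· < ·) → (∀ v, c ≤ v → (v ∈ F ↔ v ∈ L)) →
      c ≤ pvScanB L c ∧ pvScanB L c ∉ F ∧ (∀ v, c ≤ v → v < pvScanB L c → v ∈ F) := by
  intro L
  induction L with
  | nil =>
    intro c _ hmem
    refine ⟨le_rfl, ?_, fun v hv hv' => by simp [pvScanB] at hv'; omega⟩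
    simpa [pvScanB] using (hmem c le_rfl)
  | cons f rest ih =>
    intro c hpw hmem
    have hpf : ∀ g ∈ rest, f < g := (List.pairwise_cons.mp hpw).1
    have hpw' : rest.Pairwise (· < ·) := (List.pairwise_cons.mp hpw).2
    by_cases h1 : f < c
    · rw [pvScanB, if_pos h1]
      refine ih c hpw' ?_
      intro v hv
      rw [hmem v hv, List.mem_cons]
      constructor
      · intro h
        rcases h with h | h
        · exact absurd h1 (by omega)
        · exact h
      · exact Or.inr
    · rw [pvScanB, if_neg h1]
      by_cases h2 : f = c
      · rw [if_pos h2]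
        subst h2
        have hmem' : ∀ v, f + 1 ≤ v → (v ∈ F ↔ v ∈ rest) := by
          intro v hv
          rw [hmem v (by omega), List.mem_cons]
          constructor
          · intro h
            rcases h with h | h
            · exact absurd h (by omega)
            · exact h
          · exact Or.inr
        obtain ⟨hle, hnm, hmin⟩ := ih (f + 1) hpw' hmem'
        refine ⟨by omega, hnm, ?_⟩
        intro v hv hv'
        by_cases hvf : v = f
        · subst hvf; exact (hmem v le_rfl).mpr (List.mem_cons_self)
        · exact hmin v (by omega) hv'

      · rw [if_neg h2]
        refine ⟨le_rfl, ?_, fun v hv hv' => by omega⟩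
        intro hcF
        rcases List.mem_cons.mp ((hmem c le_rfl).mp hcF) with h | h
        · exact absurd h.symm h2
        · exact absurd (hpf c h) (by omega)

-- prefix built by A's for-loop = the first index elements (index = m, a Nat, m ≤ length)
theorem pvPrefix_eq (l : List Int) :
    ∀ (m : Nat), m ≤ l.length → (List.range m).map (fun k => l.getD k 0) = l.take m := by
  intro m
  induction m with
  | zero => intro _; simp
  | succ m ih =>
    intro hm
    rw [List.range_succ, List.map_append, ih (by omega), List.take_add_one]
    simp [List.getD, List.getElem?_eq_getElem (by omega : m < l.length)]

-- pvGood characterization of A's while-loop applied to a list p (A runs it on the possibly-updated copy)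
theorem pvAGood' (p : List Int) (index n : Int) (h : PySem.Raise.InRange p.length index) :
    pvGood (p.take (max index 0).toNat) (p.getD (pvIdx p.length index) 0) n
      (pvWhileA ((PySem.List.pyRange 0 index 1).map (fun x => PySem.List.pyGetD p x 0))
        (PySem.List.pyGetD p index 0) n ((n - PySem.List.pyGetD p index 0).toNat + 1) 1) := by
  have hb : PySem.List.pyGetD p index 0 = p.getD (pvIdx p.length index) 0 := pvGetD_idx p index 0 h
  have hpref : (PySem.List.pyRange 0 index 1).map (fun x => PySem.List.pyGetD p x 0)
      = p.take (max index 0).toNat := by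
    by_cases h0 : 0 ≤ index
    · rw [PySem.List.pyRange_one, List.map_map]
      have h1 : ∀ kk ∈ List.range (index - 0).toNat,
          ((fun x => PySem.List.pyGetD p x 0) ∘ fun j : Nat => (0 : Int) + j) kk = p.getD kk 0 := by
        intro kk _
        simp [PySem.List.pyGetD_natCast]
      rw [List.map_congr_left h1, (by omega : (index - 0).toNat = (max index 0).toNat),
        pvPrefix_eq p (max index 0).toNat (by obtain ⟨h1', h2'⟩ := h; omega)]
    · rw [PySem.List.pyRange_one_eq_nil (by omega), (by omega : (max index 0).toNat = 0)]
      simp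
  rw [hb, hpref]
  apply pvWhileA_good _ _ _ _ 1 le_rfl (by omega)
  intro v hv hv'
  omega

-- pvGood characterization of A's result
theorem pvAGood (l : List Int) (index n : Int) (k : Bool)
    (h : PySem.Raise.InRange l.length index) :
    pvGood (l.take (max index 0).toNat) (if k then 0 else l.getD (pvIdx l.length index) 0) n
      (moguPovecatNa l index n k) := by
  unfold moguPovecatNa
  cases k
  · simpa using pvAGood' l index n h
  · simp only [reduceIte]
    rw [pvSetD_idx l index 0 h]
    have hjlt : pvIdx l.length index < l.length := pvIdx_lt l.length index h
    have h' : PySem.Raise.InRange (l.set (pvIdx l.length index) 0).length index := by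
      simpa using h
    have hgoal := pvAGood' (l.set (pvIdx l.length index) 0) index n h'
    have hm : (max index 0).toNat ≤ pvIdx l.length index := by
      obtain ⟨h1, h2⟩ := h
      unfold pvIdx
      split <;> omega
    have ht : (l.set (pvIdx l.length index) 0).take (max index 0).toNat
        = l.take (max index 0).toNat := by
      rw [List.take_set]
      exact List.set_eq_of_length_le (by simp; omega)
    have hpv : pvIdx (l.set (pvIdx l.length index) 0).length index = pvIdx l.length index := by
      simp
    have hg : (l.set (pvIdx l.length index) 0).getD (pvIdx l.length index) 0 = 0 := by
      rw [List.getD, List.getElem?_eq_getElem (by simp; omega), Option.getD_some,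
        List.getElem_set_self]
    rw [ht, hpv, hg] at hgoal
    exact hgoal

-- pvGood characterization of B's result
theorem pvAltGood (l : List Int) (index n : Int) (k : Bool)
    (h : PySem.Raise.InRange l.length index) :
    pvGood (l.take (max index 0).toNat) (if k then 0 else l.getD (pvIdx l.length index) 0) n
      (moguPovecatNa_alt l index n k) := by
  unfold moguPovecatNa_alt
  rw [PySem.List.slice_to _ (by omega : (0:Int) ≤ max index 0)]
  set F := l.take (max index 0).toNat with hF
  set b : Int := if k then 0 else l.getD (pvIdx l.length index) 0 with hb
  have hbase : (if k then 0 else PySem.List.pyGetD l index 0) = b := by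
    rw [pvGetD_idx l index 0 h, hb]
  rw [hbase]
  set L := PySem.List.sorted (PySem.Set.ofList F) (fun x => x) false with hL
  have hpw : L.Pairwise (· < ·) := PySem.List.sorted_ofList_pairwise_lt F
  have hmem : ∀ v : Int, b + 1 ≤ v → (v ∈ F ↔ v ∈ L) := by
    intro v _
    rw [hL, PySem.List.mem_sorted, PySem.Set.mem_ofList]
  obtain ⟨hle, hnm, hmin⟩ := pvScanB_good F L (b + 1) hpw hmem
  set c := pvScanB L (b + 1) with hc
  by_cases hcn : c ≤ n
  · rw [if_pos hcn]
    exact Or.inr ⟨by omega, hcn, hnm, fun v hv hv' => hmin v (by omega) hv'⟩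
  · rw [if_neg hcn]
    exact Or.inl ⟨rfl, fun v hv hv' => hmin v (by omega) (by omega)⟩

-- ===== VERDICT (by name: the statement is the Claim_ definition above) =====
theorem moguPovecatNa_spec : Claim_equal_moguPovecatNa := by
  intro l index n k _ hpre
  unfold Spec_moguPovecatNa
  exact pvGood_unique _ _ _ _ _ (pvAGood l index n k hpre) (pvAltGood l index n k hpre)
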